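-- pv_equiv track=rewrite | github.com/MrBrantCode/unitest_baseline | mut_generate/mist_train_cf/cf_104834/solution.py | compute_max_difference
-- ===== SOURCE A (Python) =====
-- def compute_max_difference(list1, list2):
--     max_diff = None
--     for num1 in list1:
--         for num2 in list2:
--             diff = abs(num1 - num2)
--             if max_diff is None or diff > max_diff:
--                 max_diff = diff
--     return max_diff
-- ===== SOURCE B (Python) =====
-- def compute_max_difference(list1, list2):
--     if not list1 or not list2:
--         return None
--     return max(max(list1) - min(list2), max(list2) - min(list1))
-- ===== Notes on version B (the rewrite author's own statement) =====
-- stated objective: faster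
-- what changed: Replaces the nested scan over all cross-pairs by computing min and max of each list once and returning max(max1-min2, max2-min1).
import Mathlib
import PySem

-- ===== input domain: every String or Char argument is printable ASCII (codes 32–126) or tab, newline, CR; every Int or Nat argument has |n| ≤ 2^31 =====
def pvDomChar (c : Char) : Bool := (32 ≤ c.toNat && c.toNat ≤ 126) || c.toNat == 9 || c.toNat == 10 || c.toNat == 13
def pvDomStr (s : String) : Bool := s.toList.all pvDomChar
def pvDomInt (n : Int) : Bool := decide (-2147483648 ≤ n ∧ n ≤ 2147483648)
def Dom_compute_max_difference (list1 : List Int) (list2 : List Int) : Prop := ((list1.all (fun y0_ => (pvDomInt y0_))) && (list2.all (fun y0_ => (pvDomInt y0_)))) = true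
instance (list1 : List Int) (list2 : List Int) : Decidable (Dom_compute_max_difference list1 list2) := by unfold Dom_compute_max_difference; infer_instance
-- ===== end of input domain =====

-- B computes min/max of each list once and returns max(max1-min2, max2-min1) instead of scanning all cross-pairs.

-- ===== PORT A =====
-- inner-loop body: diff = abs(num1 - num2); if max_diff is None or diff > max_diff: max_diff = diff
def pvInnerStep (num1 : Int) (max_diff : Option Int) (num2 : Int) : Option Int :=
  let diff := |num1 - num2|
  match max_diff with
  | none => some diff
  | some m => if diff > m then some diff else some m

def compute_max_difference (list1 : List Int) (list2 : List Int) : Option Int :=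
  list1.foldl (fun max_diff num1 => list2.foldl (pvInnerStep num1) max_diff) none

-- ===== PORT B =====
-- Python's max/min on a list (B only calls them behind the nonemptiness guard, so the [] value is never reached)
def pvListMax (l : List Int) : Int :=
  match l with
  | [] => 0
  | x :: xs => xs.foldl max x

def pvListMin (l : List Int) : Int :=
  match l with
  | [] => 0
  | x :: xs => xs.foldl min x

def compute_max_difference_alt (list1 : List Int) (list2 : List Int) : Option Int :=
  if list1 = [] ∨ list2 = [] then none
  else some (max (pvListMax list1 - pvListMin list2) (pvListMax list2 - pvListMin list1))

-- ===== PRECONDITION & SPEC =====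
def Spec_compute_max_difference (list1 : List Int) (list2 : List Int) (out : Option Int) : Prop := out = compute_max_difference_alt list1 list2
instance (list1 : List Int) (list2 : List Int) (out : Option Int) : Decidable (Spec_compute_max_difference list1 list2 out) := by unfold Spec_compute_max_difference; infer_instance

-- ===== CLAIM (what is proved, stated in full; the proofs are below) =====
def Claim_equal_compute_max_difference : Prop := ∀ (list1 : List Int) (list2 : List Int), Dom_compute_max_difference list1 list2 → Spec_compute_max_difference list1 list2 (compute_max_difference list1 list2)

-- ===== LEMMAS AND PROOFS =====

-- the list of all pair distances |x - y|, x ∈ l1, y ∈ l2, in A's traversal order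
def pvPairs (l1 l2 : List Int) : List Int :=
  l1.flatMap (fun x => l2.map (fun y => |x - y|))

theorem pvInnerStep_some (num1 m num2 : Int) :
    pvInnerStep num1 (some m) num2 = some (max m |num1 - num2|) := by
  simp only [pvInnerStep]
  by_cases h : |num1 - num2| > m
  · simp [h, max_eq_right (le_of_lt h)]
  · simp [h, max_eq_left (not_lt.1 h)]

theorem foldl_innerStep_some (num1 : Int) (l : List Int) (m : Int) :
    l.foldl (pvInnerStep num1) (some m) = some ((l.map (fun y => |num1 - y|)).foldl max m) := by
  induction l generalizing m with
  | nil => rfl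
  | cons b bs ih => simp [List.foldl_cons, pvInnerStep_some, ih]

theorem outer_some (l1 l2 : List Int) (m : Int) :
    l1.foldl (fun acc num1 => l2.foldl (pvInnerStep num1) acc) (some m)
      = some ((pvPairs l1 l2).foldl max m) := by
  induction l1 generalizing m with
  | nil => rfl
  | cons a as ih =>
    simp only [List.foldl_cons, foldl_innerStep_some, ih, pvPairs, List.flatMap_cons,
      List.foldl_append]

theorem A_cons (a b : Int) (as bs : List Int) :
    compute_max_difference (a :: as) (b :: bs)
      = some (((bs.map (fun y => |a - y|)) ++ pvPairs as (b :: bs)).foldl max |a - b|) := by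
  unfold compute_max_difference
  rw [List.foldl_cons]
  rw [List.foldl_cons]
  rw [show pvInnerStep a none b = some |a - b| from rfl]
  rw [foldl_innerStep_some, outer_some, List.foldl_append]

theorem le_foldl_max (l : List Int) (a : Int) : a ≤ l.foldl max a := by
  induction l generalizing a with
  | nil => exact le_refl a
  | cons x xs ih => exact le_trans (le_max_left a x) (ih (max a x))

theorem mem_le_foldl_max (l : List Int) (a x : Int) (hx : x ∈ l) : x ≤ l.foldl max a := by
  induction l generalizing a with
  | nil => cases hx
  | cons y ys ih =>
    rcases List.mem_cons.1 hx with rfl | h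
    · exact le_trans (le_max_right a x) (le_foldl_max ys (max a x))
    · exact ih (max a y) h

theorem foldl_max_le (l : List Int) (a c : Int) (ha : a ≤ c) (h : ∀ x ∈ l, x ≤ c) :
    l.foldl max a ≤ c := by
  induction l generalizing a with
  | nil => exact ha
  | cons x xs ih =>
    exact ih (max a x) (max_le ha (h x (by simp))) (fun y hy => h y (by simp [hy]))

theorem foldl_max_mem (l : List Int) (a : Int) : l.foldl max a = a ∨ l.foldl max a ∈ l := by
  induction l generalizing a with
  | nil => exact Or.inl rfl
  | cons x xs ih =>
    rcases ih (max a x) with h | h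
    · rcases max_cases a x with ⟨he, _⟩ | ⟨he, _⟩
      · left; simp only [List.foldl_cons]; rw [h, he]
      · right; simp only [List.foldl_cons]; rw [h, he]; simp
    · right; simp only [List.foldl_cons]; simp [h]

theorem foldl_min_ge (l : List Int) (a : Int) : l.foldl min a ≤ a := by
  induction l generalizing a with
  | nil => exact le_refl a
  | cons x xs ih => exact le_trans (ih (min a x)) (min_le_left a x)

theorem foldl_min_le_mem (l : List Int) (a x : Int) (hx : x ∈ l) : l.foldl min a ≤ x := by
  induction l generalizing a with
  | nil => cases hx
  | cons y ys ih =>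
    rcases List.mem_cons.1 hx with rfl | h
    · exact le_trans (foldl_min_ge ys (min a x)) (min_le_right a x)
    · exact ih (min a y) h

theorem foldl_min_mem (l : List Int) (a : Int) : l.foldl min a = a ∨ l.foldl min a ∈ l := by
  induction l generalizing a with
  | nil => exact Or.inl rfl
  | cons x xs ih =>
    rcases ih (min a x) with h | h
    · rcases min_cases a x with ⟨he, _⟩ | ⟨he, _⟩
      · left; simp only [List.foldl_cons]; rw [h, he]
      · right; simp only [List.foldl_cons]; rw [h, he]; simp
    · right; simp only [List.foldl_cons]; simp [h]

theorem pvListMax_mem (l : List Int) (h : l ≠ []) : pvListMax l ∈ l := by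
  match l with
  | x :: xs =>
    simp only [pvListMax]
    rcases foldl_max_mem xs x with he | hm
    · rw [he]; simp
    · simp [hm]

theorem pvListMin_mem (l : List Int) (h : l ≠ []) : pvListMin l ∈ l := by
  match l with
  | x :: xs =>
    simp only [pvListMin]
    rcases foldl_min_mem xs x with he | hm
    · rw [he]; simp
    · simp [hm]

theorem le_pvListMax (l : List Int) (x : Int) (hx : x ∈ l) : x ≤ pvListMax l := by
  match l with
  | y :: ys =>
    simp only [pvListMax]
    rcases List.mem_cons.1 hx with rfl | h
    · exact le_foldl_max ys x
    · exact mem_le_foldl_max ys y x h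

theorem pvListMin_le (l : List Int) (x : Int) (hx : x ∈ l) : pvListMin l ≤ x := by
  match l with
  | y :: ys =>
    simp only [pvListMin]
    rcases List.mem_cons.1 hx with rfl | h
    · exact foldl_min_ge ys x
    · exact foldl_min_le_mem ys y x h

-- every cross distance is bounded by B's answer T
theorem pair_le_T (l1 l2 : List Int) (x y : Int) (hx : x ∈ l1) (hy : y ∈ l2) :
    |x - y| ≤ max (pvListMax l1 - pvListMin l2) (pvListMax l2 - pvListMin l1) := by
  have h1 := le_pvListMax l1 x hx
  have h2 := pvListMin_le l2 y hy
  have h3 := le_pvListMax l2 y hy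
  have h4 := pvListMin_le l1 x hx
  rcases abs_cases (x - y) with ⟨he, _⟩ | ⟨he, _⟩
  · rw [he]
    exact le_trans (by omega) (le_max_left _ _)
  · rw [he]
    exact le_trans (by omega) (le_max_right _ _)

-- every cross distance is bounded by A's answer g
theorem pair_le_g (a b x y : Int) (as bs : List Int) (hx : x ∈ a :: as) (hy : y ∈ b :: bs) :
    |x - y| ≤ ((bs.map (fun y => |a - y|)) ++ pvPairs as (b :: bs)).foldl max |a - b| := by
  rcases List.mem_cons.1 hx with rfl | hx'
  · rcases List.mem_cons.1 hy with rfl | hy'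
    · exact le_foldl_max _ _
    · exact mem_le_foldl_max _ _ _ (List.mem_append_left _ (List.mem_map.2 ⟨y, hy', rfl⟩))
  · exact mem_le_foldl_max _ _ _ (List.mem_append_right _
      (by simp only [pvPairs, List.mem_flatMap, List.mem_map]; exact ⟨x, hx', y, hy, rfl⟩))

theorem A_nil_right (l1 : List Int) : compute_max_difference l1 [] = none := by
  unfold compute_max_difference
  induction l1 with
  | nil => rfl
  | cons a as ih => simp

theorem main_cons (a b : Int) (as bs : List Int) :
    compute_max_difference (a :: as) (b :: bs) = compute_max_difference_alt (a :: as) (b :: bs) := by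
  rw [A_cons]
  unfold compute_max_difference_alt
  rw [if_neg (by simp)]
  congr 1
  apply le_antisymm
  · apply foldl_max_le
    · exact pair_le_T (a :: as) (b :: bs) a b (by simp) (by simp)
    · intro z hz
      rcases List.mem_append.1 hz with hz | hz
      · rcases List.mem_map.1 hz with ⟨y, hy, rfl⟩
        exact pair_le_T (a :: as) (b :: bs) a y (by simp) (by simp [hy])
      · rcases (by simpa only [pvPairs, List.mem_flatMap, List.mem_map] using hz :
          ∃ x ∈ as, ∃ y ∈ b :: bs, |x - y| = z) with ⟨x, hx, y, hy, rfl⟩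
        exact pair_le_T (a :: as) (b :: bs) x y (by simp [hx]) hy
  · apply max_le
    · calc pvListMax (a :: as) - pvListMin (b :: bs)
          ≤ |pvListMax (a :: as) - pvListMin (b :: bs)| := le_abs_self _
        _ ≤ _ := pair_le_g a b _ _ as bs (pvListMax_mem _ (by simp)) (pvListMin_mem _ (by simp))
    · calc pvListMax (b :: bs) - pvListMin (a :: as)
          ≤ |pvListMax (b :: bs) - pvListMin (a :: as)| := le_abs_self _
        _ = |pvListMin (a :: as) - pvListMax (b :: bs)| := by rw [abs_sub_comm]
        _ ≤ _ := pair_le_g a b _ _ as bs (pvListMin_mem _ (by simp)) (pvListMax_mem _ (by simp))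

-- ===== VERDICT (by name: the statement is the Claim_ definition above) =====
theorem compute_max_difference_spec : Claim_equal_compute_max_difference := by
  intro l1 l2 _
  unfold Spec_compute_max_difference
  match l1, l2 with
  | [], l2 => simp [compute_max_difference, compute_max_difference_alt]
  | a :: as, [] => simp [A_nil_right, compute_max_difference_alt]
  | a :: as, b :: bs => exact main_cons a b as bs
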